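-- pv_equiv track=rewrite | github.com/hzwuhao8/ccc | 2018/s4.py | f1
-- ===== SOURCE A (Python) =====
-- dic_cache = {}
--
-- def f1(n):
--     if n == 1:
--         return 1
--     elif n == 2:
--         return 1
--     else:
--         if n in dic_cache:
--             return dic_cache[n]
--         total = 0
--         for k in range(2, n + 1):
--             total += f1(n // k)
--     dic_cache[n] = total
--     return total
-- ===== SOURCE B (Python) =====
-- _cache = {}
--
-- def f1(n):
--     if n <= 0:
--         return 0
--     if n <= 2:
--         return 1
--     if n in _cache:
--         return _cache[n]
--     # divisor-block grouping: n//k is constant on blocks [k, n//(n//k)]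
--     blocks = []
--     k = 2
--     while k <= n:
--         v = n // k
--         k2 = n // v
--         blocks.append((v, k2 - k + 1))
--         k = k2 + 1
--     total = sum(c * f1(v) for v, c in blocks)
--     _cache[n] = total
--     return total
-- ===== Notes on version B (the rewrite author's own statement) =====
-- stated objective: faster
-- what changed: Replaces the O(n) inner loop over k=2..n by divisor-block grouping: it enumerates the O(sqrt(n)) distinct values of n//k with their block counts and sums count*f1(v), so each state costs O(sqrt(n)) instead of O(n).
import Mathlib
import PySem

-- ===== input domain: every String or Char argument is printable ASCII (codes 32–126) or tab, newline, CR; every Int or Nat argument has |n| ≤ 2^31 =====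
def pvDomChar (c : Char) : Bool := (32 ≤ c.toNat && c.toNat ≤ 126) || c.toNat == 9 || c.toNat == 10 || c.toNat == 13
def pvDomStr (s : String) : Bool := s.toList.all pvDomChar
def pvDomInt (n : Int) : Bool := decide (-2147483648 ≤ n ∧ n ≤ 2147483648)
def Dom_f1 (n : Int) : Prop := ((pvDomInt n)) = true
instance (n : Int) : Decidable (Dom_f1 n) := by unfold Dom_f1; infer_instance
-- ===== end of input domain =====

-- B replaces A's O(n) inner loop by divisor-block grouping (O(sqrt n) blocks per state);
-- both Pythons memoize in a module-level dict, which only caches and never changes the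
-- returned value, so the ports carry the recursion without the cache (fuel n.toNat + 1
-- is a totality guard only: every recursive call strictly decreases n.toNat).

-- ===== PORT A =====
-- A: if n==1 or n==2 return 1, else total = sum over k in range(2, n+1) of f1(n//k).
def f1Aux : Nat → Int → Int
  | 0, _ => 0   -- never reached: fuel > n.toNat at every call
  | fuel + 1, n =>
    if n = 1 then 1
    else if n = 2 then 1
    else
      (PySem.List.pyRange 2 (n + 1) 1).foldl
        (fun total k => total + f1Aux fuel (PySem.Int.floordiv n k)) 0

def f1 (n : Int) : Int := f1Aux (n.toNat + 1) n

-- ===== PORT B =====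
-- B's while loop collecting the blocks (v, count), v = n//k, k2 = n//v (inlined).
def f1BlocksAux : Nat → Int → Int → List (Int × Int)
  | 0, _, _ => []   -- never reached: fuel ≥ (n+1-k).toNat at every call
  | fuel + 1, n, k =>
    if 1 ≤ k ∧ k ≤ n then
      (PySem.Int.floordiv n k, PySem.Int.floordiv n (PySem.Int.floordiv n k) - k + 1)
        :: f1BlocksAux fuel n (PySem.Int.floordiv n (PySem.Int.floordiv n k) + 1)
    else []

def f1AltAux : Nat → Int → Int
  | 0, _ => 0   -- never reached: fuel > n.toNat at every call
  | fuel + 1, n =>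
    if n ≤ 0 then 0
    else if n ≤ 2 then 1
    else
      (f1BlocksAux (n - 1).toNat n 2).foldl
        (fun t p => t + p.2 * f1AltAux fuel p.1) 0

def f1_alt (n : Int) : Int := f1AltAux (n.toNat + 1) n

-- ===== PRECONDITION & SPEC =====
def Spec_f1 (n : Int) (out : Int) : Prop := out = f1_alt n
instance (n : Int) (out : Int) : Decidable (Spec_f1 n out) := by unfold Spec_f1; infer_instance

-- ===== CLAIM (what is proved, stated in full; the proofs are below) =====
def Claim_equal_f1 : Prop := ∀ (n : Int), Dom_f1 n → Spec_f1 n (f1 n)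

-- ===== LEMMAS AND PROOFS =====

-- n//j is constant for j in the block [k, n//(n//k)]
theorem ediv_const_on_block (n k j : Int) (hk : 1 ≤ k) (hkn : k ≤ n)
    (hj1 : k ≤ j) (hj2 : j ≤ n / (n / k)) : n / j = n / k := by
  have hkpos : (0:Int) < k := by omega
  have hv1 : 1 ≤ n / k := by rw [Int.le_ediv_iff_mul_le hkpos]; omega
  have hjpos : (0:Int) < j := by omega
  have hle : n / j ≤ n / k := by
    rw [Int.le_ediv_iff_mul_le hkpos]
    calc n / j * k ≤ n / j * j := by
          have h0 : 0 ≤ n / j := Int.ediv_nonneg (by omega) (by omega)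
          nlinarith
    _ ≤ n := Int.ediv_mul_le n (by omega)
  have hge : n / k ≤ n / j := by
    rw [Int.le_ediv_iff_mul_le hjpos]
    have := (Int.le_ediv_iff_mul_le (by omega : (0:Int) < n / k)).1 hj2
    nlinarith
  omega

-- folding t + g(n//j) over range(k, n+1) equals folding the counted blocks
theorem foldl_blocks (g : Int → Int) (n : Int) :
    ∀ (fuel : Nat) (k t : Int), (n + 1 - k).toNat ≤ fuel → 1 ≤ k →
    (PySem.List.pyRange k (n + 1) 1).foldl (fun t j => t + g (PySem.Int.floordiv n j)) t
      = (f1BlocksAux fuel n k).foldl (fun t p => t + p.2 * g p.1) t := by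
  intro fuel
  induction fuel with
  | zero =>
    intro k t hM hk
    rw [f1BlocksAux, PySem.List.pyRange_one_eq_nil (by omega)]
    rfl
  | succ M ihM =>
    intro k t hM hk
    by_cases hc : 1 ≤ k ∧ k ≤ n
    · rw [f1BlocksAux, if_pos hc]
      have hkpos : (0:Int) < k := by omega
      have hfd : PySem.Int.floordiv n k = n / k :=
        PySem.Int.floordiv_eq_ediv_of_pos hkpos
      have hv1 : 1 ≤ n / k := by rw [Int.le_ediv_iff_mul_le hkpos]; omega
      set k2 := n / (n / k) with hk2def
      have hfd2 : PySem.Int.floordiv n (n / k) = k2 := by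
        rw [hk2def, PySem.Int.floordiv_eq_ediv_of_pos (by omega : (0:Int) < n / k)]
      have hk2k : k ≤ k2 := by
        rw [hk2def, Int.le_ediv_iff_mul_le (by omega : (0:Int) < n / k)]
        calc k * (n / k) = n / k * k := by ring
        _ ≤ n := Int.ediv_mul_le n (by omega)
      have hk2n : k2 ≤ n := by
        rw [hk2def]
        calc n / (n / k) ≤ n / (n / k) * (n / k) := by
              have h0 : 0 ≤ n / (n / k) := Int.ediv_nonneg (by omega) (by omega)
              nlinarith
        _ ≤ n := Int.ediv_mul_le n (by omega)
      -- split the range at k2+1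
      rw [PySem.List.pyRange_one_append k (k2 + 1) (n + 1) (by omega) (by omega),
        List.foldl_append]
      -- the first segment: every j in [k, k2] has n//j = n//k
      have hconst : (PySem.List.pyRange k (k2 + 1) 1).foldl
          (fun t j => t + g (PySem.Int.floordiv n j)) t
          = t + (k2 - k + 1) * g (n / k) := by
        have hcount : ∀ (m : Nat) (a t : Int), k ≤ a → a + m = k2 + 1 →
            (PySem.List.pyRange a (a + (m : Int)) 1).foldl
              (fun t j => t + g (PySem.Int.floordiv n j)) t
              = t + (m : Int) * g (n / k) := by
          intro m
          induction m with
          | zero => intro a t _ _; rw [PySem.List.pyRange_one_eq_nil (by omega)]; simp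
          | succ m ihm =>
            intro a t ha hend
            rw [PySem.List.pyRange_one_cons (by push_cast; omega)]
            simp only [List.foldl_cons]
            have hja : PySem.Int.floordiv n a = n / k := by
              rw [PySem.Int.floordiv_eq_ediv_of_pos (by omega : (0:Int) < a)]
              exact ediv_const_on_block n k a (by omega) (by omega) ha
                (by rw [← hk2def]; push_cast at hend; omega)
            rw [hja]
            have := ihm (a + 1) (t + g (n / k)) (by omega) (by push_cast at hend ⊢; omega)
            have harg : (a : Int) + ((m + 1 : Nat) : Int) = a + 1 + (m : Int) := by
              push_cast; ring
            rw [harg, this]; push_cast; ring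
        have := hcount (k2 + 1 - k).toNat k t (le_refl k) (by omega)
        rw [show k + ((k2 + 1 - k).toNat : Int) = k2 + 1 by omega] at this
        rw [this]
        have : ((k2 + 1 - k).toNat : Int) = k2 - k + 1 := by omega
        rw [this]
      rw [hconst, List.foldl_cons, hfd, hfd2]
      exact ihM (k2 + 1) (t + (k2 - k + 1) * g (n / k)) (by omega) (by omega)
    · rw [f1BlocksAux, if_neg hc, PySem.List.pyRange_one_eq_nil (by omega)]
      rfl

theorem f1Aux_eq_altAux : ∀ (fuel : Nat) (n : Int), n.toNat < fuel →
    f1Aux fuel n = f1AltAux fuel n := by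
  intro fuel
  induction fuel with
  | zero => intro n hn; omega
  | succ M ihM =>
    intro n hn
    by_cases h0 : n ≤ 0
    · rw [f1Aux, f1AltAux, if_neg (by omega), if_neg (by omega), if_pos h0,
        PySem.List.pyRange_one_eq_nil (by omega)]
      simp
    · by_cases h12 : n ≤ 2
      · interval_cases n <;> rw [f1Aux, f1AltAux] <;> simp
      · rw [f1Aux, if_neg (by omega), if_neg (by omega),
          f1AltAux, if_neg (by omega), if_neg (by omega)]
        have hrepl : (PySem.List.pyRange 2 (n + 1) 1).foldl
            (fun total k => total + f1Aux M (PySem.Int.floordiv n k)) 0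
            = (PySem.List.pyRange 2 (n + 1) 1).foldl
            (fun total k => total + f1AltAux M (PySem.Int.floordiv n k)) 0 := by
          apply PySem.List.foldl_congr_mem
          intro acc j hj
          have hj' := (PySem.List.mem_pyRange_one).1 hj
          have hjpos : (0:Int) < j := by omega
          rw [PySem.Int.floordiv_eq_ediv_of_pos hjpos]
          have hlt : n / j < n := by
            rw [Int.ediv_lt_iff_lt_mul hjpos]; nlinarith
          have hnn : 0 ≤ n / j := Int.ediv_nonneg (by omega) (by omega)
          rw [ihM (n / j) (by omega)]
        rw [hrepl, foldl_blocks (f1AltAux M) n (n - 1).toNat 2 0 (by omega) (by omega)]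

-- ===== VERDICT (by name: the statement is the Claim_ definition above) =====
theorem f1_spec : Claim_equal_f1 := by
  intro n _
  unfold Spec_f1 f1 f1_alt
  exact f1Aux_eq_altAux (n.toNat + 1) n (by omega)
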